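-- pv_equiv track=rewrite | github.com/burghoff/Scientific-Inkscape | scientific_inkscape/TextParser.py | ttgenerator
-- ===== SOURCE A (Python) =====
-- TT_TEXT = 1
--
-- TT_TAIL = 0
--
-- def ttgenerator(Nd,starti=0,stopi=None):
--     di = starti
--     if stopi is None: stopi = Nd
--     tt = TT_TAIL
--     while True:
--         if tt == TT_TEXT:
--             di += 1
--             tt = TT_TAIL
--         else:
--             tt = TT_TEXT
--         if di == stopi and tt == TT_TEXT:
--             return
--         else:
--             yield di, tt
-- ===== SOURCE B (Python) =====
-- TT_TEXT = 1
--
-- TT_TAIL = 0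
--
-- def ttgenerator(Nd, starti=0, stopi=None):
--     # Staged construction, no toggle state machine: build the TEXT pairs and the
--     # TAIL pairs in bulk (zip of a range with a constant column), interleave them
--     # by strided slice assignment into a preallocated list, and yield the result.
--     if stopi is None:
--         stopi = Nd
--     n = stopi - starti
--     if n < 0:
--         n = 0
--     out = [None] * (2 * n)
--     out[0::2] = zip(range(starti, stopi), [TT_TEXT] * n)
--     out[1::2] = zip(range(starti + 1, stopi + 1), [TT_TAIL] * n)
--     yield from out
-- ===== Notes on version B (the rewrite author's own statement) =====
-- stated objective: alternative
-- what changed: Replaced the TT_TAIL/TT_TEXT toggle state machine (one yield per iteration, state carried across iterations) by staged bulk construction: the TEXT column and the TAIL column are each built in one pass as zip(range, constant) and interleaved by strided slice assignment, then yielded.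
import Mathlib
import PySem

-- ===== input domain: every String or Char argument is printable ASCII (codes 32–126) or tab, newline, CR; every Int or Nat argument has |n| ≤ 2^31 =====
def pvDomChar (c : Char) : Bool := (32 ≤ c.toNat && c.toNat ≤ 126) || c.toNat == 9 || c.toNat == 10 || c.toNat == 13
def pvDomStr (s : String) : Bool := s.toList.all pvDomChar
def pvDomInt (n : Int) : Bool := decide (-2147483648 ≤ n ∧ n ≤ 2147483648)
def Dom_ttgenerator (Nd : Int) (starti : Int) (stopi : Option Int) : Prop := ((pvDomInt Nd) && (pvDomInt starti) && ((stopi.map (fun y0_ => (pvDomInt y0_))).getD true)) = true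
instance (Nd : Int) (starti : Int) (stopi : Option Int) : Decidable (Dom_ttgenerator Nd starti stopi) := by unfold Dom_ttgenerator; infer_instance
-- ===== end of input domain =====

-- B replaces A's toggle state machine by staged bulk construction (two zipped columns
-- interleaved); no speed claim; equivalence is about the list of yielded pairs.

-- ===== PORT A =====
-- A's while-True loop with the tt toggle: one yield per iteration; fuel makes the
-- recursion total (it is large enough on Pre_; outside Pre_ the Python generator never terminates).
def ttLoopA (stop : Int) : Int → Int → Nat → List (Int × Int)
  | _, _, 0 => []
  | di, tt, fuel+1 =>
    let p := if tt == 1 then (di + 1, 0) else (di, 1)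
    if p.1 == stop && p.2 == 1 then []
    else (p.1, p.2) :: ttLoopA stop p.1 p.2 fuel

def ttgenerator (Nd : Int) (starti : Int) (stopi : Option Int) : List (Int × Int) :=
  let stop := stopi.getD Nd
  ttLoopA stop starti 0 (2 * (stop - starti) + 1).toNat

-- ===== PORT B =====
-- B's staged construction: the TEXT column zip(range(starti,stop), [1]*n) and the
-- TAIL column zip(range(starti+1,stop+1), [0]*n), interleaved by strided slice
-- assignment (out[0::2]/out[1::2]); ttZipFlat is that interleaving (the two
-- columns always have equal length here).
def ttZipFlat : List (Int × Int) → List (Int × Int) → List (Int × Int)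
  | x :: xs, y :: ys => x :: y :: ttZipFlat xs ys
  | _, _ => []

def ttgenerator_alt (Nd : Int) (starti : Int) (stopi : Option Int) : List (Int × Int) :=
  let stop := stopi.getD Nd
  let n := (stop - starti).toNat
  ttZipFlat
    ((PySem.List.pyRange starti stop 1).zip (List.replicate n (1 : Int)))
    ((PySem.List.pyRange (starti + 1) (stop + 1) 1).zip (List.replicate n (0 : Int)))

-- ===== PRECONDITION & SPEC =====
-- Pre_ excludes starti > stop (where stop = stopi if given, else Nd): there the Python
-- generator never terminates (di only increases and never equals stop), so A returns no value.
def Pre_ttgenerator (Nd : Int) (starti : Int) (stopi : Option Int) : Prop :=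
  starti ≤ stopi.getD Nd
instance (Nd : Int) (starti : Int) (stopi : Option Int) : Decidable (Pre_ttgenerator Nd starti stopi) := by unfold Pre_ttgenerator; infer_instance

def pvWitness_ttgenerator : Int × Int × Option Int := (3, 0, none)

def Spec_ttgenerator (Nd : Int) (starti : Int) (stopi : Option Int) (out : List (Int × Int)) : Prop := out = ttgenerator_alt Nd starti stopi
instance (Nd : Int) (starti : Int) (stopi : Option Int) (out : List (Int × Int)) : Decidable (Spec_ttgenerator Nd starti stopi out) := by unfold Spec_ttgenerator; infer_instance

-- ===== CLAIM =====
def Claim_equal_ttgenerator : Prop := ∀ (Nd : Int) (starti : Int) (stopi : Option Int), Dom_ttgenerator Nd starti stopi → Pre_ttgenerator Nd starti stopi → Spec_ttgenerator Nd starti stopi (ttgenerator Nd starti stopi)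

-- ===== LEMMAS AND PROOFS =====

-- Canonical description of the yielded list: n full TEXT/TAIL steps from s.
def ttCanon : Int → Nat → List (Int × Int)
  | _, 0 => []
  | s, n+1 => (s, 1) :: (s + 1, 0) :: ttCanon (s + 1) n

-- A's fueled toggle loop equals the canonical list when stop = di + n.
theorem ttLoopA_eq_canon (n : Nat) : ∀ (di : Int),
    ttLoopA (di + n) di 0 (2 * n + 1) = ttCanon di n := by
  induction n with
  | zero =>
    intro di
    simp [ttLoopA, ttCanon]
  | succ n ih =>
    intro di
    have hA : ttLoopA (di + (n+1 : Nat)) di 0 (2 * (n+1) + 1)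
        = (di, 1) :: (di + 1, 0) :: ttLoopA (di + (n+1 : Nat)) (di + 1) 0 (2 * n + 1) := by
      show ttLoopA (di + (n+1 : Nat)) di 0 (2 * n + 1 + 1 + 1) = _
      rw [ttLoopA, ttLoopA]
      simp only [beq_iff_eq]
      split_ifs with hc1 hc2 <;> simp_all <;> try omega
    have harg : di + ((n : Nat) + 1 : Nat) = (di + 1) + (n : Nat) := by push_cast; ring
    rw [hA, harg, ih (di + 1), ttCanon]

-- B's interleaving of the two zipped columns equals the canonical list.
theorem ttZipFlat_eq_canon (n : Nat) : ∀ (s : Int),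
    ttZipFlat
      ((PySem.List.pyRange s (s + n) 1).zip (List.replicate n (1 : Int)))
      ((PySem.List.pyRange (s + 1) (s + n + 1) 1).zip (List.replicate n (0 : Int)))
    = ttCanon s n := by
  induction n with
  | zero =>
    intro s
    simp [ttZipFlat, ttCanon]
  | succ n ih =>
    intro s
    have h1 : s < s + ((n : Nat) + 1 : Nat) := by push_cast; omega
    have h2 : s + 1 < s + ((n : Nat) + 1 : Nat) + 1 := by push_cast; omega
    rw [PySem.List.pyRange_one_cons h1, PySem.List.pyRange_one_cons h2]
    have hb1 : (s + ((n : Nat) + 1 : Nat) : Int) = (s + 1) + (n : Nat) := by push_cast; ring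
    rw [hb1]
    simp only [List.replicate_succ, List.zip_cons_cons, ttZipFlat]
    rw [ih (s + 1), ttCanon]

-- ===== VERDICT =====
theorem ttgenerator_spec : Claim_equal_ttgenerator := by
  intro Nd starti stopi _ hpre
  have hle : starti ≤ stopi.getD Nd := hpre
  obtain ⟨n, hs⟩ : ∃ n : Nat, stopi.getD Nd = starti + (n : Int) :=
    ⟨(stopi.getD Nd - starti).toNat, by omega⟩
  show ttLoopA (stopi.getD Nd) starti 0 (2 * (stopi.getD Nd - starti) + 1).toNat
      = ttZipFlat
          ((PySem.List.pyRange starti (stopi.getD Nd) 1).zip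
            (List.replicate (stopi.getD Nd - starti).toNat (1 : Int)))
          ((PySem.List.pyRange (starti + 1) (stopi.getD Nd + 1) 1).zip
            (List.replicate (stopi.getD Nd - starti).toNat (0 : Int)))
  rw [hs]
  have hf1 : (2 * ((starti + (n : Int)) - starti) + 1).toNat = 2 * n + 1 := by omega
  have hf2 : ((starti + (n : Int)) - starti).toNat = n := by omega
  rw [hf1, hf2, ttZipFlat_eq_canon n starti]
  exact ttLoopA_eq_canon n starti
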